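-- pv_equiv track=rewrite | github.com/ashartaqi/LearnPython | my_functions.py | name_letter_counter
-- ===== SOURCE A (Python) =====
-- def name_letter_counter(lst):
--     name_with_less_than_5_letters = 0
--     name_with_more_than_5_letters = 0
--     for i in lst:
--         if len(i) <= 5:
--             name_with_less_than_5_letters += 1
--         elif len(i) >= 6:
--             name_with_more_than_5_letters += 1
--
--     return name_with_less_than_5_letters, name_with_more_than_5_letters
-- ===== SOURCE B (Python) =====
-- def name_letter_counter(lst):
--     # Stage 1: build a histogram of name lengths.
--     hist = {}
--     for name in lst:
--         hist[len(name)] = hist.get(len(name), 0) + 1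
--     # Stage 2: fold the histogram into the two class totals.
--     short = 0
--     long = 0
--     for length, cnt in hist.items():
--         if length <= 5:
--             short += cnt
--         else:
--             long += cnt
--     return short, long
-- ===== Notes on version B (the rewrite author's own statement) =====
-- stated objective: alternative
-- what changed: B builds a length-histogram dict in a first pass and then folds the histogram (one entry per distinct length) into the two totals, instead of A's single loop with an if/elif pair of accumulators over the names.
import Mathlib
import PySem

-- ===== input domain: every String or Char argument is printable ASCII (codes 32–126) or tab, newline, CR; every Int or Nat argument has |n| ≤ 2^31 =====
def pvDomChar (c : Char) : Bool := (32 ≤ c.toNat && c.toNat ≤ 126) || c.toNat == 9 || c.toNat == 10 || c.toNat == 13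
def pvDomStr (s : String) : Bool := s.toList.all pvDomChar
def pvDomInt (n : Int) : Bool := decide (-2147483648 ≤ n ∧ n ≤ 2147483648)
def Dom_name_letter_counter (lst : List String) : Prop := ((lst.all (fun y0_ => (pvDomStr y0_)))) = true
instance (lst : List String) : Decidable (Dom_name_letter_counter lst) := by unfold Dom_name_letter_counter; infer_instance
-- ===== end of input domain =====

-- B builds a length-histogram dict first and then folds the histogram into the two class totals (alternative decomposition, same O(n)).


-- ===== PORT A =====
-- Literal port of A: one loop, two accumulators, if/elif in source order.
def name_letter_counter (lst : List String) : Int × Int :=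
  lst.foldl (fun (acc : Int × Int) i =>
    if (PySem.Str.len i) ≤ 5 then (acc.1 + 1, acc.2)
    else if (PySem.Str.len i) ≥ 6 then (acc.1, acc.2 + 1)
    else acc) (0, 0)

-- ===== PORT B =====
-- Port of B: stage 1 builds the length histogram; stage 2 folds hist.items into the totals.
def name_letter_counter_alt (lst : List String) : Int × Int :=
  let hist : PySem.Dict Int Int :=
    lst.foldl (fun d name =>
      d.insert (PySem.Str.len name) (d.getD (PySem.Str.len name) 0 + 1)) PySem.Dict.empty
  hist.items.foldl (fun (acc : Int × Int) p =>
    if p.1 ≤ 5 then (acc.1 + p.2, acc.2) else (acc.1, acc.2 + p.2)) (0, 0)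

-- ===== PRECONDITION & SPEC =====
def Spec_name_letter_counter (lst : List String) (out : Int × Int) : Prop := out = name_letter_counter_alt lst
instance (lst : List String) (out : Int × Int) : Decidable (Spec_name_letter_counter lst out) := by unfold Spec_name_letter_counter; infer_instance

-- ===== CLAIM (what is proved, stated in full; the proofs are below) =====
def Claim_equal_name_letter_counter : Prop := ∀ (lst : List String), Dom_name_letter_counter lst → Spec_name_letter_counter lst (name_letter_counter lst)

-- ===== LEMMAS AND PROOFS =====

-- A's fold counts the two classes directly.
theorem a_fold_eq (lst : List String) (a b : Int) :
    lst.foldl (fun (acc : Int × Int) i =>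
      if (PySem.Str.len i) ≤ 5 then (acc.1 + 1, acc.2)
      else if (PySem.Str.len i) ≥ 6 then (acc.1, acc.2 + 1)
      else acc) (a, b)
    = (a + (lst.countP (fun i => PySem.Str.len i ≤ 5) : Int),
       b + (lst.countP (fun i => ¬ PySem.Str.len i ≤ 5) : Int)) := by
  induction lst generalizing a b with
  | nil => simp
  | cons x xs ih =>
    by_cases h : PySem.Str.len x ≤ 5
    · rw [List.foldl_cons, if_pos h, ih]
      simp [List.countP_cons, PySem.Str.len] at h ⊢
      simp [h]
      omega
    · have h6 : PySem.Str.len x ≥ 6 := by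
        simp [PySem.Str.len] at h ⊢; omega
      rw [List.foldl_cons, if_neg h, if_pos h6, ih]
      simp [List.countP_cons, PySem.Str.len] at h ⊢
      simp [h]
      omega

-- B's second-stage fold splits an items list by key class and sums the values.
theorem items_fold_eq (ps : List (Int × Int)) (a b : Int) :
    ps.foldl (fun (acc : Int × Int) p =>
      if p.1 ≤ 5 then (acc.1 + p.2, acc.2) else (acc.1, acc.2 + p.2)) (a, b)
    = (a + ((ps.filter (fun p => p.1 ≤ 5)).map (·.2)).sum,
       b + ((ps.filter (fun p => ¬ p.1 ≤ 5)).map (·.2)).sum) := by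
  induction ps generalizing a b with
  | nil => simp
  | cons p ps ih =>
    by_cases h : p.1 ≤ 5
    · rw [List.foldl_cons, if_pos h, ih]
      simp [h]
      ring
    · rw [List.foldl_cons, if_neg h, ih]
      simp [h, not_le.1 h]
      ring

-- Summing the multiplicities of the distinct lengths in one class gives that class's countP.
theorem sum_counts_eq (lens : List Int) (p : Int → Bool) :
    ((((PySem.Set.ofList lens).map (fun k => (k, (lens.count k : Int)))).filter
        (fun q => p q.1)).map (·.2)).sum
    = (lens.countP p : Int) := by
  have hperm : List.Perm (PySem.Set.ofList lens) lens.dedup :=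
    (List.perm_ext_iff_of_nodup (PySem.Set.nodup_ofList lens) lens.nodup_dedup).mpr
      (by intro a; rw [PySem.Set.mem_ofList, List.mem_dedup])
  have hperm2 :
      List.Perm
        ((((PySem.Set.ofList lens).map (fun k => (k, (lens.count k : Int)))).filter
          (fun q => p q.1)).map (·.2))
        (((lens.dedup.map (fun k => (k, (lens.count k : Int)))).filter
          (fun q => p q.1)).map (·.2)) :=
    (((hperm.map _).filter _).map _)
  rw [hperm2.sum_eq]
  simp only [List.filter_map, List.map_map]
  rw [← List.sum_map_count_dedup_filter_eq_countP p lens]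
  push_cast
  simp [List.map_map, Function.comp_def]

-- ===== VERDICT (by name: the statement is the Claim_ definition above) =====
theorem name_letter_counter_spec : Claim_equal_name_letter_counter := by
  intro lst _
  unfold Spec_name_letter_counter name_letter_counter name_letter_counter_alt
  rw [a_fold_eq]
  have hhist :
      lst.foldl (fun (d : PySem.Dict Int Int) name =>
        d.insert (PySem.Str.len name) (d.getD (PySem.Str.len name) 0 + 1)) PySem.Dict.empty
      = PySem.Dict.counter (lst.map PySem.Str.len) := by
    rw [← PySem.Dict.foldl_insert_getD_add_one_eq_counter, List.foldl_map]
  rw [hhist, items_fold_eq, PySem.Dict.items_counter]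
  rw [sum_counts_eq (lst.map PySem.Str.len) (fun k => decide (k ≤ 5)),
      sum_counts_eq (lst.map PySem.Str.len) (fun k => decide (¬ k ≤ 5)),
      List.countP_map, List.countP_map]
  simp only [Prod.mk.injEq]
  constructor <;>
    · simp only [zero_add, Nat.cast_inj]
      apply List.countP_congr
      intro x _
      simp [Function.comp_def, PySem.Str.len]
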